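-- pv_equiv track=rewrite | github.com/aAT0047/Autosvp | SIMULATION/sv.py | find_delete_keys
-- ===== SOURCE A (Python) =====
-- def find_delete_keys(k,original_dict):
--     previous_discontinuous_dict = {}
--     next_discontinuous_dict = {}
--
--     keys = list(original_dict.keys())
--     values = list(original_dict.values())
--
--     for i in range(len(keys)):
--         key = keys[i]
--         value = values[i]
--
--         if i > 0 and key == keys[i - 1] + k:
--             # if value[0] == values[i - 1][0] +k:
--             next_discontinuous_dict[key] = value
--
--         if i < len(keys) - 1 and key == keys[i + 1] - k:
--             # if value[0] == values[i + 1][0] -k: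
--             previous_discontinuous_dict[key] = value
--
--     return previous_discontinuous_dict, next_discontinuous_dict
-- ===== SOURCE B (Python) =====
-- def find_delete_keys(k, original_dict):
--     items = list(original_dict.items())
--     prev_pairs = []
--     next_pairs = []
--     while len(items) >= 2:
--         b = items.pop()
--         a = items[-1]
--         if b[0] == a[0] + k:
--             prev_pairs.append(a)
--             next_pairs.append(b)
--     return dict(reversed(prev_pairs)), dict(reversed(next_pairs))
-- ===== Notes on version B (the rewrite author's own statement) =====
-- stated objective: alternative
-- what changed: Replaces A's forward index loop with per-element two-neighbor checks and in-place dict insertion by a backward while-loop that pops items off the end, collects the continuous pair endpoints in reverse order into two plain lists, and builds both result dicts at the end from the reversed lists with the dict() constructor.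
import Mathlib
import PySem

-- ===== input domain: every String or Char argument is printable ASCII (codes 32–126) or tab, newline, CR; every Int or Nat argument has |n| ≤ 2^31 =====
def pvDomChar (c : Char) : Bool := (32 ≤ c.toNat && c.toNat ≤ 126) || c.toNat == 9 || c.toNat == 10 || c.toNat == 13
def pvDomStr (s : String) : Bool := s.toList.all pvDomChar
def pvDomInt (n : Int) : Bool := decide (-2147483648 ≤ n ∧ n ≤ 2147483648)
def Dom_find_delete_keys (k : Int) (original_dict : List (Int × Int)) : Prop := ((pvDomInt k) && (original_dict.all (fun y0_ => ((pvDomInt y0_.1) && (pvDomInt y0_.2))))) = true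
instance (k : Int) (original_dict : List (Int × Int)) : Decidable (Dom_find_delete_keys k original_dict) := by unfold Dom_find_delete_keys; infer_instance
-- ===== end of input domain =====

-- B replaces A's forward index loop (two neighbor checks, in-place dict inserts) by a backward
-- while-loop popping items off the end, collecting the continuous pair ends in reverse into two
-- lists, and building both dicts at the end from the reversed lists (objective: alternative).


-- ===== PORT A =====
-- the dict argument arrives as an assoc list; PySem.Dict.ofList reconstructs the Python dict
def find_delete_keys (k : Int) (original_dict : List (Int × Int)) : (List (Int × Int)) × (List (Int × Int)) :=
  let d := PySem.Dict.ofList original_dict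
  let keys := d.keys
  let values := d.values
  let st := (PySem.List.pyRange 0 (PySem.List.len keys) 1).foldl
    (fun (st : PySem.Dict Int Int × PySem.Dict Int Int) i =>
      let key := PySem.List.pyGetD keys i 0
      let value := PySem.List.pyGetD values i 0
      let st1 := if 0 < i ∧ key = PySem.List.pyGetD keys (i - 1) 0 + k
                 then (st.1, st.2.insert key value) else st
      if i < PySem.List.len keys - 1 ∧ key = PySem.List.pyGetD keys (i + 1) 0 - k
      then (st1.1.insert key value, st1.2) else st1)
    (PySem.Dict.empty, PySem.Dict.empty)
  (st.1.items, st.2.items)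

-- ===== PORT B =====
-- the 'while len(items) >= 2: b = items.pop(); a = items[-1]; …' loop of Source B
def fdkLoop (k : Int) (items prev nxt : List (Int × Int)) : (List (Int × Int)) × (List (Int × Int)) :=
  if 2 ≤ items.length then
    let items' := items.dropLast          -- items.pop() shrinks the list …
    let b := items.getLastD (0, 0)        -- … and returns the last element
    let a := items'.getLastD (0, 0)       -- items[-1] after the pop
    if b.1 = a.1 + k then fdkLoop k items' (prev ++ [a]) (nxt ++ [b])
    else fdkLoop k items' prev nxt
  else (prev, nxt)
termination_by items.length
decreasing_by all_goals simp [List.length_dropLast]; omega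

def find_delete_keys_alt (k : Int) (original_dict : List (Int × Int)) : (List (Int × Int)) × (List (Int × Int)) :=
  let d := PySem.Dict.ofList original_dict
  let pn := fdkLoop k d.items [] []
  ((PySem.Dict.ofList pn.1.reverse).items, (PySem.Dict.ofList pn.2.reverse).items)

-- ===== PRECONDITION & SPEC =====
def Spec_find_delete_keys (k : Int) (original_dict : List (Int × Int)) (out : (List (Int × Int)) × (List (Int × Int))) : Prop := out = find_delete_keys_alt k original_dict
instance (k : Int) (original_dict : List (Int × Int)) (out : (List (Int × Int)) × (List (Int × Int))) : Decidable (Spec_find_delete_keys k original_dict out) := by unfold Spec_find_delete_keys; infer_instance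

-- ===== CLAIM (what is proved, stated in full; the proofs are below) =====
def Claim_equal_find_delete_keys : Prop := ∀ (k : Int) (original_dict : List (Int × Int)), Dom_find_delete_keys k original_dict → Spec_find_delete_keys k original_dict (find_delete_keys k original_dict)

-- ===== LEMMAS AND PROOFS =====

def pvIns (ps : List (Int × Int)) : PySem.Dict Int Int :=
  ps.foldl (fun d p => d.insert p.1 p.2) PySem.Dict.empty

def pvPairs (k : Int) (its : List (Int × Int)) : List ((Int × Int) × (Int × Int)) :=
  (its.zip its.tail).filter (fun xy => decide (xy.2.1 = xy.1.1 + k))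

theorem zipPairs (its : List (Int × Int)) :
    its.zip its.tail
      = (List.range (its.length - 1)).map
          (fun j => (its.getD j (0,0), its.getD (j+1) (0,0))) := by
  apply List.ext_getElem
  · simp [List.length_zip, List.length_tail]
  · intro i h1 h2
    have hi : i < its.length - 1 := by
      simp [List.length_zip, List.length_tail] at h1; omega
    simp [List.getElem_zip, List.getElem_tail, List.getD_eq_getElem?_getD,
      List.getElem?_eq_getElem (by omega : i < its.length),
      List.getElem?_eq_getElem (by omega : i + 1 < its.length)]

theorem getD_map_fst (its : List (Int × Int)) (j : Nat) (h : j < its.length) :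
    (its.map Prod.fst).getD j 0 = (its.getD j (0,0)).1 := by
  rw [List.getD_eq_getElem?_getD, List.getD_eq_getElem?_getD,
    List.getElem?_eq_getElem (by simpa using h), List.getElem?_eq_getElem h]
  simp

theorem getD_map_snd (its : List (Int × Int)) (j : Nat) (h : j < its.length) :
    (its.map Prod.snd).getD j 0 = (its.getD j (0,0)).2 := by
  rw [List.getD_eq_getElem?_getD, List.getD_eq_getElem?_getD,
    List.getElem?_eq_getElem (by simpa using h), List.getElem?_eq_getElem h]
  simp

theorem listP (k : Int) (its : List (Int × Int)) :
    (List.filter (fun (x : Nat) => decide (((x:Int)) < (↑its.length:Int) - 1 ∧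
        PySem.List.pyGetD (its.map Prod.fst) (↑x) 0 = PySem.List.pyGetD (its.map Prod.fst) (↑x + 1) 0 - k))
      (List.range its.length)).map
      (fun (j : Nat) => (PySem.List.pyGetD (its.map Prod.fst) ((j:Int)) 0, PySem.List.pyGetD (its.map Prod.snd) ((j:Int)) 0))
    = (pvPairs k its).map (·.1) := by
  rcases hn : its.length with _ | m
  · have h0 : its = [] := List.length_eq_zero_iff.mp hn
    subst h0; simp [pvPairs]
  · unfold pvPairs
    rw [zipPairs, hn, List.range_succ, List.filter_append]
    have hlast : List.filter (fun (x : Nat) => decide (((x:Int)) < ((((m+1):Nat)):Int) - 1 ∧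
        PySem.List.pyGetD (its.map Prod.fst) (↑x) 0 = PySem.List.pyGetD (its.map Prod.fst) (↑x + 1) 0 - k)) [m] = [] := by
      simp only [List.filter_cons, List.filter_nil, decide_eq_true_eq]
      rw [if_neg]
      rintro ⟨h1, -⟩
      push_cast at h1; omega
    rw [hlast, List.append_nil]
    have hcast : ∀ j : Nat, ((j:Int) + 1) = ((j+1 : Nat) : Int) := by intro j; push_cast; ring
    rw [List.filter_congr (q := fun j => decide ((its.getD (j+1) (0,0)).1 = (its.getD j (0,0)).1 + k)) ?hp]
    case hp =>
      intro j hj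
      have hjm : j < m := List.mem_range.mp hj
      rw [decide_eq_decide]
      rw [hcast j, PySem.List.pyGetD_natCast, PySem.List.pyGetD_natCast,
        getD_map_fst _ _ (by omega), getD_map_fst _ _ (by omega)]
      constructor
      · rintro ⟨-, h2⟩; omega
      · intro h2
        refine ⟨by push_cast; omega, by omega⟩
    rw [List.map_congr_left (g := fun j => its.getD j (0,0)) ?hm]
    case hm =>
      intro j hj
      have hjm : j < m := List.mem_range.mp (List.mem_of_mem_filter hj)
      rw [PySem.List.pyGetD_natCast, PySem.List.pyGetD_natCast,
        getD_map_fst _ _ (by omega), getD_map_snd _ _ (by omega)]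
    rw [Nat.add_sub_cancel, List.filter_map, List.map_map]
    rfl

theorem listN (k : Int) (its : List (Int × Int)) :
    (List.filter (fun (x : Nat) => decide (0 < ((x:Int)) ∧
        PySem.List.pyGetD (its.map Prod.fst) (↑x) 0 = PySem.List.pyGetD (its.map Prod.fst) (↑x - 1) 0 + k))
      (List.range its.length)).map
      (fun (j : Nat) => (PySem.List.pyGetD (its.map Prod.fst) ((j:Int)) 0, PySem.List.pyGetD (its.map Prod.snd) ((j:Int)) 0))
    = (pvPairs k its).map (·.2) := by
  rcases hn : its.length with _ | m
  · have h0 : its = [] := List.length_eq_zero_iff.mp hn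
    subst h0; simp [pvPairs]
  · unfold pvPairs
    rw [zipPairs, hn, List.range_succ_eq_map]
    rw [List.filter_cons]
    rw [if_neg (by simp)]
    rw [List.filter_map, List.map_map]
    rw [List.filter_congr (q := fun j => decide ((its.getD (j+1) (0,0)).1 = (its.getD j (0,0)).1 + k)) ?hp]
    case hp =>
      intro j hj
      have hjm : j < m := List.mem_range.mp hj
      simp only [Function.comp_apply]
      rw [decide_eq_decide]
      have hc : ((j.succ : Nat) : Int) - 1 = ((j : Nat) : Int) := by push_cast; ring
      rw [hc, PySem.List.pyGetD_natCast, PySem.List.pyGetD_natCast,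
        getD_map_fst _ _ (by omega), getD_map_fst _ _ (by omega)]
      constructor
      · rintro ⟨-, h2⟩; exact h2
      · intro h2
        exact ⟨by push_cast; omega, h2⟩
    rw [List.map_congr_left (g := fun j => its.getD (j+1) (0,0)) ?hm]
    case hm =>
      intro j hj
      have hjm : j < m := List.mem_range.mp (List.mem_of_mem_filter hj)
      simp only [Function.comp_apply]
      rw [PySem.List.pyGetD_natCast, PySem.List.pyGetD_natCast,
        getD_map_fst _ _ (by omega), getD_map_snd _ _ (by omega)]
    rw [Nat.add_sub_cancel, List.filter_map, List.map_map]
    rfl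

theorem LA (k : Int) (its : List (Int × Int)) :
  (PySem.List.pyRange 0 (PySem.List.len (its.map Prod.fst)) 1).foldl
    (fun (st : PySem.Dict Int Int × PySem.Dict Int Int) i =>
      let key := PySem.List.pyGetD (its.map Prod.fst) i 0
      let value := PySem.List.pyGetD (its.map Prod.snd) i 0
      let st1 := if 0 < i ∧ key = PySem.List.pyGetD (its.map Prod.fst) (i - 1) 0 + k
                 then (st.1, st.2.insert key value) else st
      if i < PySem.List.len (its.map Prod.fst) - 1 ∧ key = PySem.List.pyGetD (its.map Prod.fst) (i + 1) 0 - k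
      then (st1.1.insert key value, st1.2) else st1)
    (PySem.Dict.empty, PySem.Dict.empty)
  = (pvIns ((pvPairs k its).map (·.1)), pvIns ((pvPairs k its).map (·.2))) := by
  have hlen : PySem.List.len (its.map Prod.fst) = ((its.length : Nat) : Int) := by
    simp [PySem.List.len_eq]
  rw [hlen, PySem.List.pyRange_zero_natCast, List.foldl_map]
  have hsplit : (fun (st : PySem.Dict Int Int × PySem.Dict Int Int) (j : Nat) =>
      let key := PySem.List.pyGetD (its.map Prod.fst) (j : Int) 0
      let value := PySem.List.pyGetD (its.map Prod.snd) (j : Int) 0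
      let st1 := if 0 < (j : Int) ∧ key = PySem.List.pyGetD (its.map Prod.fst) ((j : Int) - 1) 0 + k
                 then (st.1, st.2.insert key value) else st
      if (j : Int) < ((its.length : Nat) : Int) - 1 ∧ key = PySem.List.pyGetD (its.map Prod.fst) ((j : Int) + 1) 0 - k
      then (st1.1.insert key value, st1.2) else st1)
    = (fun (st : PySem.Dict Int Int × PySem.Dict Int Int) (j : Nat) =>
      ((if (j : Int) < ((its.length : Nat) : Int) - 1 ∧
            PySem.List.pyGetD (its.map Prod.fst) (j : Int) 0 = PySem.List.pyGetD (its.map Prod.fst) ((j : Int) + 1) 0 - k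
        then st.1.insert (PySem.List.pyGetD (its.map Prod.fst) (j : Int) 0) (PySem.List.pyGetD (its.map Prod.snd) (j : Int) 0)
        else st.1),
       (if 0 < (j : Int) ∧
            PySem.List.pyGetD (its.map Prod.fst) (j : Int) 0 = PySem.List.pyGetD (its.map Prod.fst) ((j : Int) - 1) 0 + k
        then st.2.insert (PySem.List.pyGetD (its.map Prod.fst) (j : Int) 0) (PySem.List.pyGetD (its.map Prod.snd) (j : Int) 0)
        else st.2))) := by
    funext st j; dsimp only; split_ifs <;> rfl
  rw [hsplit]
  rw [PySem.List.foldl_prod_mk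
      (f := fun (p : PySem.Dict Int Int) (j : Nat) =>
        if (j : Int) < ((its.length : Nat) : Int) - 1 ∧
            PySem.List.pyGetD (its.map Prod.fst) (j : Int) 0 = PySem.List.pyGetD (its.map Prod.fst) ((j : Int) + 1) 0 - k
        then p.insert (PySem.List.pyGetD (its.map Prod.fst) (j : Int) 0) (PySem.List.pyGetD (its.map Prod.snd) (j : Int) 0)
        else p)
      (g := fun (q : PySem.Dict Int Int) (j : Nat) =>
        if 0 < (j : Int) ∧
            PySem.List.pyGetD (its.map Prod.fst) (j : Int) 0 = PySem.List.pyGetD (its.map Prod.fst) ((j : Int) - 1) 0 + k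
        then q.insert (PySem.List.pyGetD (its.map Prod.fst) (j : Int) 0) (PySem.List.pyGetD (its.map Prod.snd) (j : Int) 0)
        else q)]
  rw [PySem.List.foldl_ite_eq_foldl_filter, PySem.List.foldl_ite_eq_foldl_filter]
  refine Prod.ext ?_ ?_
  · show _ = pvIns ((pvPairs k its).map (·.1))
    unfold pvIns
    dsimp only
    rw [← List.foldl_map (f := fun (j : Nat) =>
        (PySem.List.pyGetD (its.map Prod.fst) (j : Int) 0, PySem.List.pyGetD (its.map Prod.snd) (j : Int) 0))
      (g := fun (d : PySem.Dict Int Int) (p : Int × Int) => d.insert p.1 p.2)]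
    rw [listP k its]
  · show _ = pvIns ((pvPairs k its).map (·.2))
    unfold pvIns
    dsimp only
    rw [← List.foldl_map (f := fun (j : Nat) =>
        (PySem.List.pyGetD (its.map Prod.fst) (j : Int) 0, PySem.List.pyGetD (its.map Prod.snd) (j : Int) 0))
      (g := fun (d : PySem.Dict Int Int) (p : Int × Int) => d.insert p.1 p.2)]
    rw [listN k its]

-- B-side: zip-with-tail and pvPairs under appending one element at the right
theorem zipTail_append_singleton (l : List (Int × Int)) (b : Int × Int) (h : l ≠ []) :
    (l ++ [b]).zip (l ++ [b]).tail = l.zip l.tail ++ [(l.getLastD (0,0), b)] := by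
  induction l with
  | nil => exact absurd rfl h
  | cons x t ih =>
    cases t with
    | nil => simp
    | cons y t' =>
      have := ih (by simp)
      simp only [List.cons_append, List.tail_cons, List.zip_cons_cons] at *
      rw [this]
      simp

theorem pvPairs_append (k : Int) (l : List (Int × Int)) (b : Int × Int) (h : l ≠ []) :
    pvPairs k (l ++ [b])
      = pvPairs k l ++ (if b.1 = (l.getLastD (0,0)).1 + k then [(l.getLastD (0,0), b)] else []) := by
  unfold pvPairs
  rw [zipTail_append_singleton l b h, List.filter_append]
  congr 1
  rw [List.getLastD_eq_getLast?]
  split_ifs with hc2 <;> simp [hc2]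

theorem fdkLoop_eq (k : Int) (items p n : List (Int × Int)) :
    fdkLoop k items p n
      = (p ++ ((pvPairs k items).map (·.1)).reverse, n ++ ((pvPairs k items).map (·.2)).reverse) := by
  induction items using List.reverseRecOn generalizing p n with
  | nil => rw [fdkLoop]; simp [pvPairs]
  | append_singleton l b ih =>
    rcases eq_or_ne l [] with hl | hl
    · subst hl; rw [fdkLoop]; simp [pvPairs]
    · rw [fdkLoop]
      have hlen : 2 ≤ (l ++ [b]).length := by
        rcases List.exists_cons_of_ne_nil hl with ⟨x, t, rfl⟩
        simp only [List.length_append, List.length_cons, List.length_nil]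
        omega
      rw [if_pos hlen]
      have hd : (l ++ [b]).dropLast = l := by simp
      have hg : (l ++ [b]).getLastD (0,0) = b := by
        rw [List.getLastD_eq_getLast?]; simp
      rw [hd, hg, pvPairs_append k l b hl]
      dsimp only
      split_ifs with hc
      · rw [ih]
        simp
      · rw [ih]
        simp

theorem ofList_eq_pvIns (l : List (Int × Int)) :
    (PySem.Dict.ofList l : PySem.Dict Int Int) = pvIns l := by
  rfl

theorem find_delete_keys_main (k : Int) (od : List (Int × Int)) :
    find_delete_keys k od = find_delete_keys_alt k od := by
  unfold find_delete_keys find_delete_keys_alt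
  have hk : (PySem.Dict.ofList od : PySem.Dict Int Int).keys
      = ((PySem.Dict.ofList od : PySem.Dict Int Int).items).map Prod.fst := rfl
  have hv : (PySem.Dict.ofList od : PySem.Dict Int Int).values
      = ((PySem.Dict.ofList od : PySem.Dict Int Int).items).map Prod.snd := rfl
  dsimp only
  rw [hk, hv, LA k ((PySem.Dict.ofList od : PySem.Dict Int Int).items)]
  rw [fdkLoop_eq]
  simp only [List.nil_append, List.reverse_reverse, ofList_eq_pvIns]

-- ===== VERDICT (by name: the statement is the Claim_ definition above) =====
theorem find_delete_keys_spec : Claim_equal_find_delete_keys := by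
  intro k od _
  unfold Spec_find_delete_keys
  exact find_delete_keys_main k od
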